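-- pv_equiv track=rewrite | github.com/queelius/computational-explorations | src/approx_algorithms.py | build_coprime_graph
-- ===== SOURCE A (Python) =====
-- import math
-- from typing import (
--     Any,
--     Callable,
--     Dict,
--     FrozenSet,
--     List,
--     Optional,
--     Set,
--     Tuple,
-- )
--
-- def build_coprime_graph(n: int) -> Dict[int, Set[int]]:
--     """Build adjacency-list representation of G(n), vertices 1..n."""
--     adj: Dict[int, Set[int]] = {v: set() for v in range(1, n + 1)}
--     for i in range(1, n + 1):
--         for j in range(i + 1, n + 1):
--             if math.gcd(i, j) == 1:
--                 adj[i].add(j)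
--                 adj[j].add(i)
--     return adj
-- ===== SOURCE B (Python) =====
-- def _noncoprime(v, n):
--     """Set of u in 1..n sharing a common divisor > 1 with v."""
--     non = set()
--     for d in range(2, v + 1):
--         if v % d == 0:
--             non.update(range(d, n + 1, d))
--     return non
--
--
-- def build_coprime_graph(n):
--     """Build adjacency-list representation of G(n), vertices 1..n."""
--     adj = {}
--     for v in range(1, n + 1):
--         non = _noncoprime(v, n)
--         adj[v] = {u for u in range(1, n + 1) if u != v and u not in non}
--     return adj
-- ===== Notes on version B (the rewrite author's own statement) =====
-- stated objective: alternative
-- what changed: Instead of a gcd test on every unordered pair with symmetric insertions into a mutable dict of sets, B builds each vertex's row independently: it scans v's divisors once, marks all their multiples up to n in one 'non-coprime' set, and collects the unmarked vertices.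
import Mathlib
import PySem

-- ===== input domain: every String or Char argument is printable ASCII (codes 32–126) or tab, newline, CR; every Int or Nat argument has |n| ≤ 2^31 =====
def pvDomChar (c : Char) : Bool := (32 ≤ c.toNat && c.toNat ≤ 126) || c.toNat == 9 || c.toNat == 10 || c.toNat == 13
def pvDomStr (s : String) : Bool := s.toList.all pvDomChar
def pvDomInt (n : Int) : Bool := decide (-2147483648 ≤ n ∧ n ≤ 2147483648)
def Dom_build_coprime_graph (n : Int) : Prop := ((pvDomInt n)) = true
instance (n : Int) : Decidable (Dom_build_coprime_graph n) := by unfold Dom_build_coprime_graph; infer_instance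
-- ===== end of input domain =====

-- B replaces A's per-pair gcd test and symmetric dict-of-sets updates by building each vertex's
-- row independently from a per-vertex 'non-coprime' marking set (multiples of v's divisors).

-- ===== PORT A =====
-- the dict comprehension '{v: set() for v in range(1, n + 1)}'
def pvAdj0 (n : Int) : PySem.Dict Int (List Int) :=
  (PySem.List.pyRange 1 (n + 1) 1).foldl (fun d v => d.insert v ([] : List Int)) PySem.Dict.empty

-- the inner 'for j in range(i + 1, n + 1)' loop of A
def pvAInner (n i : Int) (d : PySem.Dict Int (List Int)) : PySem.Dict Int (List Int) :=
  (PySem.List.pyRange (i + 1) (n + 1) 1).foldl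
    (fun d j =>
      if Int.gcd i j = 1 then
        (d.modify i [] (fun s => PySem.Set.add s j)).modify j [] (fun s => PySem.Set.add s i)
      else d) d

def build_coprime_graph (n : Int) : List (Int × List Int) :=
  ((PySem.List.pyRange 1 (n + 1) 1).foldl (fun d i => pvAInner n i d) (pvAdj0 n)).items

-- ===== PORT B =====
-- helper _noncoprime(v, n) of Source B
def pvNoncoprime (v n : Int) : PySem.Set Int :=
  (PySem.List.pyRange 2 (v + 1) 1).foldl
    (fun s d =>
      if PySem.Int.mod v d = 0 then PySem.Set.update s (PySem.List.pyRange d (n + 1) d) else s)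
    PySem.Set.empty

def build_coprime_graph_alt (n : Int) : List (Int × List Int) :=
  ((PySem.List.pyRange 1 (n + 1) 1).foldl
    (fun d v =>
      let non := pvNoncoprime v n
      d.insert v (PySem.Set.ofList
        ((PySem.List.pyRange 1 (n + 1) 1).filter (fun u => u != v && !(PySem.Set.contains non u)))))
    PySem.Dict.empty).items

-- ===== PRECONDITION & SPEC =====
def Spec_build_coprime_graph (n : Int) (out : List (Int × List Int)) : Prop := out = build_coprime_graph_alt n
instance (n : Int) (out : List (Int × List Int)) : Decidable (Spec_build_coprime_graph n out) := by unfold Spec_build_coprime_graph; infer_instance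

-- ===== CLAIM (what is proved, stated in full; the proofs are below) =====
def Claim_equal_build_coprime_graph : Prop := ∀ (n : Int), Dom_build_coprime_graph n → Spec_build_coprime_graph n (build_coprime_graph n)

-- ===== LEMMAS AND PROOFS =====

-- the common value of both rows: coprime partners below v, then coprime partners above v
def pvRow (n v : Int) : List Int :=
  (PySem.List.pyRange 1 v 1).filter (fun u => decide (Int.gcd u v = 1)) ++
  (PySem.List.pyRange (v + 1) (n + 1) 1).filter (fun j => decide (Int.gcd v j = 1))

theorem pv_contains_false {s : PySem.Set Int} {x : Int} (h : x ∉ s) : s.contains x = false := by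
  cases hc : s.contains x
  · rfl
  · exact absurd ((PySem.Set.contains_iff s x).mp hc) h

theorem pv_add_append {s : PySem.Set Int} {x : Int} (h : x ∉ s) :
    PySem.Set.add s x = s ++ [x] := by
  show (if s.contains x then s else s ++ [x]) = s ++ [x]
  rw [pv_contains_false h]; rfl

theorem pv_update_append : ∀ (l : List Int) (s : PySem.Set Int), l.Nodup → (∀ x ∈ l, x ∉ s) →
    PySem.Set.update s l = s ++ l := by
  intro l
  induction l with
  | nil => intro s _ _; simp [PySem.Set.update]
  | cons x t ih =>
    intro s hnd hdisj
    have hx : x ∉ s := hdisj x (by simp)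
    have h1 : PySem.Set.update s (x :: t) = PySem.Set.update (PySem.Set.add s x) t := rfl
    rw [h1, pv_add_append hx, ih (s ++ [x]) hnd.of_cons ?_]
    · simp
    · intro y hy
      simp only [List.mem_append, List.mem_singleton]
      rintro (h | rfl)
      · exact hdisj y (List.mem_cons_of_mem _ hy) h
      · exact (List.nodup_cons.mp hnd).1 hy

-- ---------- B-side characterisation ----------

theorem pv_mem_noncoprime_fold (v n u : Int) : ∀ (l : List Int) (s : PySem.Set Int),
    (u ∈ l.foldl
      (fun s d =>
        if PySem.Int.mod v d = 0 then PySem.Set.update s (PySem.List.pyRange d (n + 1) d) else s) s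
     ↔ u ∈ s ∨ ∃ d ∈ l, PySem.Int.mod v d = 0 ∧ u ∈ PySem.List.pyRange d (n + 1) d) := by
  intro l
  induction l with
  | nil => intro s; simp
  | cons x t ih =>
    intro s
    simp only [List.foldl_cons]
    by_cases hx : PySem.Int.mod v x = 0
    · rw [if_pos hx, ih]
      simp only [PySem.Set.mem_update, List.mem_cons]
      constructor
      · rintro ((h | h) | ⟨d, hd, h1, h2⟩)
        · exact Or.inl h
        · exact Or.inr ⟨x, Or.inl rfl, hx, h⟩
        · exact Or.inr ⟨d, Or.inr hd, h1, h2⟩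
      · rintro (h | ⟨d, (rfl | hd), h1, h2⟩)
        · exact Or.inl (Or.inl h)
        · exact Or.inl (Or.inr h2)
        · exact Or.inr ⟨d, hd, h1, h2⟩
    · rw [if_neg hx, ih]
      constructor
      · rintro (h | ⟨d, hd, h1, h2⟩)
        · exact Or.inl h
        · exact Or.inr ⟨d, List.mem_cons_of_mem _ hd, h1, h2⟩
      · rintro (h | ⟨d, hd, h1, h2⟩)
        · exact Or.inl h
        · rcases List.mem_cons.mp hd with rfl | hd
          · exact absurd h1 hx
          · exact Or.inr ⟨d, hd, h1, h2⟩

theorem pv_mem_noncoprime_iff {u v n : Int} (hu1 : 1 ≤ u) (hun : u ≤ n) (hv : 1 ≤ v) :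
    u ∈ pvNoncoprime v n ↔ Int.gcd u v ≠ 1 := by
  unfold pvNoncoprime
  rw [pv_mem_noncoprime_fold]
  constructor
  · rintro (h | ⟨d, hd, hmod, hmem⟩)
    · simp [PySem.Set.empty] at h
    · obtain ⟨hd2, hdv⟩ := PySem.List.mem_pyRange_one.mp hd
      have hdvdv : d ∣ v := (PySem.Int.mod_eq_zero_iff_dvd v d).mp hmod
      obtain ⟨hdu, hun', hsub⟩ := (PySem.List.mem_pyRange_iff_of_pos (by omega : (0:Int) < d) u).mp hmem
      have hdvdu : d ∣ u := by
        have h := dvd_add hsub (dvd_refl d)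
        simpa using h
      intro hg
      have hcast : ((d.toNat : Int)) = d := Int.toNat_of_nonneg (by omega)
      have hdg : d.toNat ∣ Int.gcd u v :=
        Int.dvd_gcd (by rw [hcast]; exact hdvdu) (by rw [hcast]; exact hdvdv)
      rw [hg] at hdg
      have := Nat.le_of_dvd (by omega) hdg
      omega
  · intro h
    refine Or.inr ⟨(Int.gcd u v : Int), ?_, ?_, ?_⟩
    · have hgpos : 0 < Int.gcd u v := by
        rcases Nat.eq_zero_or_pos (Int.gcd u v) with h0 | h0
        · have := Int.gcd_eq_zero_iff.mp h0
          omega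
        · exact h0
      have hg2 : 2 ≤ Int.gcd u v := by omega
      have hle : (Int.gcd u v : Int) ≤ v := Int.le_of_dvd (by omega) (Int.gcd_dvd_right u v)
      exact PySem.List.mem_pyRange_one.mpr ⟨by exact_mod_cast hg2, by omega⟩
    · exact (PySem.Int.mod_eq_zero_iff_dvd v _).mpr (Int.gcd_dvd_right u v)
    · have hdvdu : (Int.gcd u v : Int) ∣ u := Int.gcd_dvd_left u v
      have hle : (Int.gcd u v : Int) ≤ u := Int.le_of_dvd (by omega) hdvdu
      refine (PySem.List.mem_pyRange_iff_of_pos ?_ u).mpr ⟨hle, by omega, ?_⟩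
      · have hgpos : 0 < Int.gcd u v := by
          rcases Nat.eq_zero_or_pos (Int.gcd u v) with h0 | h0
          · have := Int.gcd_eq_zero_iff.mp h0
            omega
          · exact h0
        exact_mod_cast hgpos
      · exact dvd_sub hdvdu (dvd_refl _)

theorem pv_row_eq (n v : Int) (hv1 : 1 ≤ v) (hvn : v ≤ n) :
    (PySem.List.pyRange 1 (n + 1) 1).filter
        (fun u => u != v && !(PySem.Set.contains (pvNoncoprime v n) u)) = pvRow n v := by
  have hsplit : PySem.List.pyRange 1 (n + 1) 1 =
      PySem.List.pyRange 1 v 1 ++ (v :: PySem.List.pyRange (v + 1) (n + 1) 1) := by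
    rw [PySem.List.pyRange_one_append 1 v (n + 1) hv1 (by omega),
      PySem.List.pyRange_one_cons (by omega : v < n + 1)]
  rw [hsplit, List.filter_append, List.filter_cons]
  unfold pvRow
  rw [if_neg (by simp)]
  congr 1
  · apply List.filter_congr
    intro u hu
    obtain ⟨hu1, huv⟩ := PySem.List.mem_pyRange_one.mp hu
    have hne : (u != v) = true := by simp; omega
    by_cases hg : Int.gcd u v = 1
    · have hnot : u ∉ pvNoncoprime v n := fun hmem =>
        (pv_mem_noncoprime_iff hu1 (by omega) hv1).mp hmem hg
      simp [hne, hg]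
      exact hnot
    · have hmem : u ∈ pvNoncoprime v n := (pv_mem_noncoprime_iff hu1 (by omega) hv1).mpr hg
      simp [hne, hg]
      exact hmem
  · apply List.filter_congr
    intro u hu
    obtain ⟨hu1, huv⟩ := PySem.List.mem_pyRange_one.mp hu
    have hne : (u != v) = true := by simp; omega
    rw [Int.gcd_comm v u]
    by_cases hg : Int.gcd u v = 1
    · have hnot : u ∉ pvNoncoprime v n := fun hmem =>
        (pv_mem_noncoprime_iff (by omega) (by omega) hv1).mp hmem hg
      simp [hne, hg]
      exact hnot
    · have hmem : u ∈ pvNoncoprime v n := (pv_mem_noncoprime_iff (by omega) (by omega) hv1).mpr hg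
      simp [hne, hg]
      exact hmem

theorem pv_B_char (n : Int) :
    build_coprime_graph_alt n =
      (PySem.List.pyRange 1 (n + 1) 1).map (fun v => (v, pvRow n v)) := by
  have hstep : build_coprime_graph_alt n =
      ((PySem.List.pyRange 1 (n + 1) 1).foldl
        (fun d v => d.insert ((fun (a : Int) => a) v)
          ((fun (a : Int) => PySem.Set.ofList
            ((PySem.List.pyRange 1 (n + 1) 1).filter
              (fun u => u != a && !(PySem.Set.contains (pvNoncoprime a n) u)))) v))
        PySem.Dict.empty).items := rfl
  rw [hstep, PySem.Dict.items_foldl_insert_fresh _ _ _ _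
    (fun a _ => PySem.Dict.contains_empty a)
    (by simpa using PySem.List.nodup_pyRange_one 1 (n + 1))]
  have hempty : (PySem.Dict.empty : PySem.Dict Int (List Int)).items = [] := rfl
  rw [hempty, List.nil_append]
  apply List.map_congr_left
  intro v hv
  obtain ⟨hv1, hvn⟩ := PySem.List.mem_pyRange_one.mp hv
  have hnd : ((PySem.List.pyRange 1 (n + 1) 1).filter
      (fun u => u != v && !(PySem.Set.contains (pvNoncoprime v n) u))).Nodup :=
    (PySem.List.nodup_pyRange_one 1 (n + 1)).filter _
  have h1 : PySem.Set.ofList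
      ((PySem.List.pyRange 1 (n + 1) 1).filter
        (fun u => u != v && !(PySem.Set.contains (pvNoncoprime v n) u))) = pvRow n v := by
    rw [PySem.Set.ofList_eq_self_of_nodup _ hnd, pv_row_eq n v hv1 (by omega)]
  exact congrArg (fun w => (v, w)) h1

-- ---------- A-side characterisation ----------

theorem pv_adj0_items (n : Int) :
    (pvAdj0 n).items = (PySem.List.pyRange 1 (n + 1) 1).map (fun v => (v, ([] : List Int))) := by
  unfold pvAdj0
  rw [PySem.Dict.items_foldl_insert_fresh _ (fun (a : Int) => a) (fun _ => ([] : List Int)) _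
    (fun a _ => PySem.Dict.contains_empty a)
    (by simpa using PySem.List.nodup_pyRange_one 1 (n + 1))]
  rfl

theorem pv_adj0_keys (n : Int) : (pvAdj0 n).keys = PySem.List.pyRange 1 (n + 1) 1 := by
  show (pvAdj0 n).items.map (·.1) = _
  rw [pv_adj0_items, List.map_map]
  exact List.map_id _

theorem pv_adj0_getD (n v : Int) (hv : v ∈ PySem.List.pyRange 1 (n + 1) 1) :
    (pvAdj0 n).getD v [] = [] := by
  apply PySem.Dict.getD_of_mem_items (pvAdj0 n)
  · rw [pv_adj0_items]
    exact List.mem_map.mpr ⟨v, hv, rfl⟩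
  · rw [pv_adj0_keys]
    exact PySem.List.nodup_pyRange_one 1 (n + 1)

theorem pv_inner_spec (n i : Int) (hi : 1 ≤ i) : ∀ (k : Nat) (t : Int), t = n + 1 - k → i < t →
    ∀ (d : PySem.Dict Int (List Int)), d.keys = PySem.List.pyRange 1 (n + 1) 1 →
    (((PySem.List.pyRange t (n + 1) 1).foldl
        (fun d j =>
          if Int.gcd i j = 1 then
            (d.modify i [] (fun s => PySem.Set.add s j)).modify j [] (fun s => PySem.Set.add s i)
          else d) d).keys = PySem.List.pyRange 1 (n + 1) 1 ∧
     ∀ v, ((PySem.List.pyRange t (n + 1) 1).foldl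
        (fun d j =>
          if Int.gcd i j = 1 then
            (d.modify i [] (fun s => PySem.Set.add s j)).modify j [] (fun s => PySem.Set.add s i)
          else d) d).getD v [] =
        if v = i then
          PySem.Set.update (d.getD i [])
            ((PySem.List.pyRange t (n + 1) 1).filter (fun j => decide (Int.gcd i j = 1)))
        else if t ≤ v ∧ v < n + 1 ∧ Int.gcd i v = 1 then PySem.Set.add (d.getD v []) i
        else d.getD v []) := by
  intro k
  induction k with
  | zero =>
    intro t ht hit d hkeys
    have hnil : PySem.List.pyRange t (n + 1) 1 = [] := PySem.List.pyRange_one_eq_nil (by omega)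
    rw [hnil]
    refine ⟨hkeys, fun v => ?_⟩
    simp only [List.foldl_nil, List.filter_nil]
    split_ifs with h1 h2
    · subst h1; rfl
    · obtain ⟨ha, hb, -⟩ := h2; omega
    · rfl
  | succ k ih =>
    intro t ht hit d hkeys
    have htlt : t < n + 1 := by omega
    rw [PySem.List.pyRange_one_cons htlt, List.foldl_cons]
    set d' := (if Int.gcd i t = 1 then
        (d.modify i [] (fun s => PySem.Set.add s t)).modify t [] (fun s => PySem.Set.add s i)
      else d) with hd'
    have hiK : i ∈ d.keys := by
      rw [hkeys]; exact PySem.List.mem_pyRange_one.mpr ⟨hi, by omega⟩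
    have htK : t ∈ d.keys := by
      rw [hkeys]; exact PySem.List.mem_pyRange_one.mpr ⟨by omega, htlt⟩
    have hkm : ∀ (dd : PySem.Dict Int (List Int)) (kk : Int) (f : List Int → List Int),
        kk ∈ dd.keys → (dd.modify kk [] f).keys = dd.keys := by
      intro dd kk f hk
      rw [PySem.Dict.keys_modify]
      exact PySem.Dict.keys_insert_of_contains _ _ ((PySem.Dict.contains_iff_mem_keys _ _).mpr hk)
    have hkeys' : d'.keys = PySem.List.pyRange 1 (n + 1) 1 := by
      rw [hd']
      split_ifs with hg
      · rw [hkm _ t _ (by rw [hkm _ i _ hiK]; exact htK), hkm _ i _ hiK]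
        exact hkeys
      · exact hkeys
    have hgetd' : ∀ w, d'.getD w [] =
        if Int.gcd i t = 1 then
          (if w = t then PySem.Set.add (d.getD t []) i
           else if w = i then PySem.Set.add (d.getD i []) t
           else d.getD w [])
        else d.getD w [] := by
      intro w
      rw [hd']
      split_ifs with hg hwt hwi
      · rw [PySem.Dict.getD_modify, if_pos hwt, PySem.Dict.getD_modify,
          if_neg (show ¬ t = i from by omega)]
      · rw [PySem.Dict.getD_modify, if_neg hwt, PySem.Dict.getD_modify, if_pos hwi]
      · rw [PySem.Dict.getD_modify, if_neg hwt, PySem.Dict.getD_modify, if_neg hwi]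
      · rfl
    obtain ⟨K, G⟩ := ih (t + 1) (by omega) (by omega) d' hkeys'
    refine ⟨K, fun v => ?_⟩
    rw [G v]
    by_cases hvi : v = i
    · rw [if_pos hvi, if_pos hvi, List.filter_cons]
      by_cases hg : Int.gcd i t = 1
      · have h1 : d'.getD i [] = PySem.Set.add (d.getD i []) t := by
          rw [hgetd' i, if_pos hg, if_neg (by omega : ¬ i = t), if_pos rfl]
        rw [h1, if_pos (by simp [hg])]
        rfl
      · have h1 : d'.getD i [] = d.getD i [] := by
          rw [hgetd' i, if_neg hg]
        rw [h1, if_neg (by simp [hg])]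
    · rw [if_neg hvi, if_neg hvi]
      by_cases hvt : v = t
      · rw [if_neg (show ¬ (t + 1 ≤ v ∧ v < n + 1 ∧ Int.gcd i v = 1) from by
          rintro ⟨h, -, -⟩; omega)]
        by_cases hg : Int.gcd i v = 1
        · have hg' : Int.gcd i t = 1 := by rw [← hvt]; exact hg
          rw [if_pos (show t ≤ v ∧ v < n + 1 ∧ Int.gcd i v = 1 from ⟨by omega, by omega, hg⟩),
            hgetd' v, if_pos hg', if_pos hvt, hvt]
        · have hg' : ¬ Int.gcd i t = 1 := fun h => hg (by rw [hvt]; exact h)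
          rw [if_neg (show ¬ (t ≤ v ∧ v < n + 1 ∧ Int.gcd i v = 1) from by
            rintro ⟨-, -, h⟩; exact hg h), hgetd' v, if_neg hg']
      · have hdv : d'.getD v [] = d.getD v [] := by
          rw [hgetd' v]
          by_cases hg : Int.gcd i t = 1
          · rw [if_pos hg, if_neg hvt, if_neg hvi]
          · rw [if_neg hg]
        rw [hdv]
        by_cases hc : t + 1 ≤ v ∧ v < n + 1 ∧ Int.gcd i v = 1
        · rw [if_pos hc, if_pos (show t ≤ v ∧ v < n + 1 ∧ Int.gcd i v = 1 from
            ⟨by omega, hc.2⟩)]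
        · rw [if_neg hc, if_neg (fun h => hc ⟨by omega, h.2⟩)]

theorem pv_outer_spec (n : Int) : ∀ (k : Nat) (m : Int), m = 1 + k → m ≤ n + 1 →
    (((PySem.List.pyRange 1 m 1).foldl (fun d i => pvAInner n i d) (pvAdj0 n)).keys =
        PySem.List.pyRange 1 (n + 1) 1 ∧
     ∀ v, 1 ≤ v → v ≤ n →
       ((PySem.List.pyRange 1 m 1).foldl (fun d i => pvAInner n i d) (pvAdj0 n)).getD v [] =
         if v < m then pvRow n v
         else (PySem.List.pyRange 1 m 1).filter (fun u => decide (Int.gcd u v = 1))) := by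
  intro k
  induction k with
  | zero =>
    intro m hm hmn
    have hm1 : m = 1 := by omega
    subst hm1
    have hnil : PySem.List.pyRange 1 1 1 = [] := PySem.List.pyRange_one_eq_nil (by omega)
    rw [hnil]
    refine ⟨pv_adj0_keys n, fun v hv1 hvn => ?_⟩
    simp only [List.foldl_nil, List.filter_nil]
    rw [if_neg (by omega), pv_adj0_getD n v (PySem.List.mem_pyRange_one.mpr ⟨hv1, by omega⟩)]
  | succ k ih =>
    intro m hm hmn
    set m0 : Int := 1 + k with hm0
    clear_value m0
    have hmm : m = m0 + 1 := by omega
    subst hmm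
    rw [PySem.List.pyRange_one_succ_right (by omega : (1:Int) ≤ m0), List.foldl_append,
      List.foldl_cons, List.foldl_nil]
    obtain ⟨KP, GP⟩ := ih m0 rfl (by omega)
    set dPrev := (PySem.List.pyRange 1 m0 1).foldl (fun d i => pvAInner n i d) (pvAdj0 n)
      with hdPrev
    clear_value dPrev
    show ((pvAInner n m0 dPrev).keys = _ ∧ _)
    unfold pvAInner
    obtain ⟨K, G⟩ := pv_inner_spec n m0 (by omega) (n - m0).toNat (m0 + 1) (by omega) (by omega)
      dPrev KP
    refine ⟨K, fun v hv1 hvn => ?_⟩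
    rw [G v]
    by_cases hvm : v = m0
    · subst hvm
      rw [if_pos rfl, if_pos (by omega : v < v + 1)]
      have hprev : dPrev.getD v [] =
          (PySem.List.pyRange 1 v 1).filter (fun u => decide (Int.gcd u v = 1)) := by
        rw [GP v hv1 hvn, if_neg (by omega)]
      have hdisj : ∀ x ∈ (PySem.List.pyRange (v + 1) (n + 1) 1).filter
          (fun j => decide (Int.gcd v j = 1)),
          x ∉ (PySem.List.pyRange 1 v 1).filter (fun u => decide (Int.gcd u v = 1)) := by
        intro x hx hy
        have hxm := PySem.List.mem_pyRange_one.mp (List.mem_filter.mp hx).1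
        have hym := PySem.List.mem_pyRange_one.mp (List.mem_filter.mp hy).1
        omega
      rw [hprev, pv_update_append _ _ ((PySem.List.nodup_pyRange_one _ _).filter _) hdisj]
      rfl
    · rw [if_neg hvm]
      by_cases hvlt : v < m0
      · rw [if_neg (show ¬ (m0 + 1 ≤ v ∧ v < n + 1 ∧ Int.gcd m0 v = 1) from by
          rintro ⟨h, -, -⟩; omega),
          if_pos (show v < m0 + 1 from by omega), GP v hv1 hvn, if_pos hvlt]
      · have hgt : m0 < v := by omega
        have hprev : dPrev.getD v [] =
            (PySem.List.pyRange 1 m0 1).filter (fun u => decide (Int.gcd u v = 1)) := by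
          rw [GP v hv1 hvn, if_neg (by omega)]
        have hnotmem : m0 ∉ (PySem.List.pyRange 1 m0 1).filter
            (fun u => decide (Int.gcd u v = 1)) := by
          intro hmem
          have := PySem.List.mem_pyRange_one.mp (List.mem_filter.mp hmem).1
          omega
        by_cases hg : Int.gcd m0 v = 1
        · rw [if_pos (show m0 + 1 ≤ v ∧ v < n + 1 ∧ Int.gcd m0 v = 1 from
            ⟨by omega, by omega, hg⟩),
            if_neg (show ¬ v < m0 + 1 from by omega), hprev, pv_add_append hnotmem,
            List.filter_append]
          simp [hg]
        · rw [if_neg (show ¬ (m0 + 1 ≤ v ∧ v < n + 1 ∧ Int.gcd m0 v = 1) from by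
            rintro ⟨-, -, h⟩; exact hg h),
            if_neg (show ¬ v < m0 + 1 from by omega), hprev, List.filter_append]
          simp [hg]

theorem pv_A_char (n : Int) :
    build_coprime_graph n =
      (PySem.List.pyRange 1 (n + 1) 1).map (fun v => (v, pvRow n v)) := by
  unfold build_coprime_graph
  by_cases hn : n ≤ 0
  · have hnil : PySem.List.pyRange 1 (n + 1) 1 = [] := PySem.List.pyRange_one_eq_nil (by omega)
    rw [hnil]
    simp only [List.foldl_nil, List.map_nil]
    rw [pv_adj0_items n, hnil]
    rfl
  · obtain ⟨K, G⟩ := pv_outer_spec n n.toNat (n + 1) (by omega) (by omega)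
    rw [PySem.Dict.items_eq_map_keys _ (by rw [K]; exact PySem.List.nodup_pyRange_one 1 (n + 1)) [],
      K]
    apply List.map_congr_left
    intro v hv
    obtain ⟨hv1, hvn⟩ := PySem.List.mem_pyRange_one.mp hv
    have hval := G v hv1 (by omega)
    rw [if_pos (by omega : v < n + 1)] at hval
    exact congrArg (fun w => (v, w)) hval

-- ===== VERDICT (by name: the statement is the Claim_ definition above) =====
theorem build_coprime_graph_spec : Claim_equal_build_coprime_graph := by
  intro n _
  unfold Spec_build_coprime_graph
  rw [pv_A_char, pv_B_char]
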